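-- pv_equiv track=rewrite | github.com/arzam16/split-zimage | split-zimage.py | where_is
-- ===== SOURCE A (Python) =====
-- def where_is(what, _in, reverse=False):
--     limit = len(_in) // 2
--
--     offsets = None
--     if not reverse:
--         offsets = range(min(len(_in), limit))
--     else:
--         offsets = range(
--             len(_in) - len(what),
--             max(0, len(_in) - limit),
--             -1
--         )
--
--     for i in offsets:
--         if _in[i] == what[0] and _in[i:i+len(what)] == what:
--             return i
--     return -1
-- ===== SOURCE B (Python) =====
-- def _match_at(what, _in, s):
--     # element-wise prefix comparison with early exit (no slice copies)
--     for j, w in enumerate(what):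
--         if _in[s + j] != w:
--             return False
--     return True
--
--
-- def where_is(what, _in, reverse=False):
--     n, m = len(_in), len(what)
--     if m == 0 or m > n:
--         return -1
--     limit = n // 2
--     lo = max(0, n - limit)  # reverse window: lo < s <= n - m
--     best = -1
--     for s in range(n - m + 1):  # single ascending scan for both directions
--         if _match_at(what, _in, s):
--             if not reverse:
--                 return s if s < limit else -1
--             if lo < s:
--                 best = s
--     return best
-- ===== Notes on version B (the rewrite author's own statement) =====
-- stated objective: alternative
-- what changed: A scans a direction-dependent offset range (descending for reverse) comparing freshly built slices; B does one unified ascending scan over all feasible start positions with an early-exit element-wise comparison, returning the first match inside the window when forward and keeping the last window match in an accumulator when reverse, after an upfront guard for empty/over-long patterns.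
import Mathlib
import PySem

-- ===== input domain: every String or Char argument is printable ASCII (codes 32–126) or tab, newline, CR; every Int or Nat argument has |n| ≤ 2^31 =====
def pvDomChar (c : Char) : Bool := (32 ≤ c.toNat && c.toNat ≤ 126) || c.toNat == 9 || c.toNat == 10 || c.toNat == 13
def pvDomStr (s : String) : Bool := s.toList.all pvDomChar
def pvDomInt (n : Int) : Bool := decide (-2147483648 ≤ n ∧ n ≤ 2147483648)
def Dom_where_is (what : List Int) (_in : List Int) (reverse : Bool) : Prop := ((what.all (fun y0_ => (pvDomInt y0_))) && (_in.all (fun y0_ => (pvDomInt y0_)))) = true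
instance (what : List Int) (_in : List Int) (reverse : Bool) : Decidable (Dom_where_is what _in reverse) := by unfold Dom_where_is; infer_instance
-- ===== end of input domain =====

-- B does one unified ascending scan with element-wise early-exit comparison instead of A's
-- direction-dependent (descending for reverse) slice-building scan; return value only, no mutation.

-- ===== PORT A =====
-- the loop body's test: _in[i] == what[0] and _in[i:i+len(what)] == what
def condA (what _in : List Int) (i : Int) : Bool :=
  (PySem.List.pyGet? _in i == PySem.List.pyGet? what 0) &&
    (PySem.List.slice _in (some i) (some (i + (what.length : Int))) == what)

-- 'for i in offsets: if …: return i' / 'return -1'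
def whereLoopA (what _in : List Int) : List Int → Int
  | [] => -1
  | i :: rest => if condA what _in i then i else whereLoopA what _in rest

def where_is (what : List Int) (_in : List Int) (reverse : Bool) : Int :=
  let limit : Int := PySem.Int.floordiv (_in.length : Int) 2
  let offsets : List Int :=
    if !reverse then
      PySem.List.pyRange 0 (min (_in.length : Int) limit) 1
    else
      PySem.List.pyRange ((_in.length : Int) - (what.length : Int))
        (max 0 ((_in.length : Int) - limit)) (-1)
  whereLoopA what _in offsets

-- ===== PORT B =====
-- _match_at: element-wise prefix comparison with early exit
def matchAt (what _in : List Int) (s : Int) : Bool :=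
  (PySem.List.enumerate what 0).all
    (fun jw => PySem.List.pyGet? _in (s + jw.1) == some jw.2)

-- the single ascending scan with the 'best' accumulator
def altLoop (what _in : List Int) (reverse : Bool) (limit lo : Int) : Int → List Int → Int
  | best, [] => best
  | best, s :: rest =>
    if matchAt what _in s then
      if !reverse then (if s < limit then s else -1)
      else altLoop what _in reverse limit lo (if lo < s then s else best) rest
    else altLoop what _in reverse limit lo best rest

def where_is_alt (what : List Int) (_in : List Int) (reverse : Bool) : Int :=
  let n : Int := (_in.length : Int)
  let m : Int := (what.length : Int)
  if m = 0 ∨ m > n then -1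
  else
    let limit : Int := PySem.Int.floordiv n 2
    let lo : Int := max 0 (n - limit)
    altLoop what _in reverse limit lo (-1) (PySem.List.pyRange 0 (n - m + 1) 1)

-- ===== PRECONDITION & SPEC =====
-- Pre_ excludes exactly the inputs where A raises IndexError: what == [] with len(_in) >= 2
-- (the offset range is nonempty there and 'what[0]' raises).
def Pre_where_is (what : List Int) (_in : List Int) (reverse : Bool) : Prop :=
  what ≠ [] ∨ _in.length < 2
instance (what : List Int) (_in : List Int) (reverse : Bool) : Decidable (Pre_where_is what _in reverse) := by unfold Pre_where_is; infer_instance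

def pvWitness_where_is : List Int × List Int × Bool := ([1], [2, 1, 3], false)

def Spec_where_is (what : List Int) (_in : List Int) (reverse : Bool) (out : Int) : Prop := out = where_is_alt what _in reverse
instance (what : List Int) (_in : List Int) (reverse : Bool) (out : Int) : Decidable (Spec_where_is what _in reverse out) := by unfold Spec_where_is; infer_instance

-- ===== CLAIM (what is proved, stated in full; the proofs are below) =====
def Claim_equal_where_is : Prop := ∀ (what : List Int) (_in : List Int) (reverse : Bool), Dom_where_is what _in reverse → Pre_where_is what _in reverse → Spec_where_is what _in reverse (where_is what _in reverse)

-- ===== LEMMAS AND PROOFS =====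

-- find? respects pointwise-equal predicates (no such lemma found in Mathlib/PySem)
theorem find?_congr_mem {α : Type} (p q : α → Bool) (l : List α)
    (h : ∀ x ∈ l, p x = q x) : l.find? p = l.find? q := by
  induction l with
  | nil => rfl
  | cons a l ih =>
    have ha := h a List.mem_cons_self
    have ih' := ih (fun x hx => h x (List.mem_cons_of_mem _ hx))
    cases hpa : p a <;> simp [hpa, ← ha, ih']

theorem whereLoopA_eq (what _in : List Int) (L : List Int) :
    whereLoopA what _in L = ((L.find? (condA what _in)).getD (-1)) := by
  induction L with
  | nil => rfl
  | cons i rest ih =>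
    cases h : condA what _in i <;> simp [whereLoopA, h, ih]

theorem altLoop_false (what _in : List Int) (limit lo best : Int) (L : List Int) :
    altLoop what _in false limit lo best L =
      (((L.find? (matchAt what _in)).map (fun s => if s < limit then s else -1)).getD best) := by
  induction L with
  | nil => rfl
  | cons s rest ih =>
    cases h : matchAt what _in s <;> simp [altLoop, h, ih]

theorem altLoop_true (what _in : List Int) (limit lo best : Int) (L : List Int) :
    altLoop what _in true limit lo best L =
      ((L.reverse.find? (fun s => matchAt what _in s && decide (lo < s))).getD best) := by
  induction L generalizing best with
  | nil => rfl
  | cons s rest ih =>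
    have hstep : altLoop what _in true limit lo best (s :: rest) =
        altLoop what _in true limit lo
          (if matchAt what _in s && decide (lo < s) then s else best) rest := by
      cases h : matchAt what _in s
      · rw [altLoop, if_neg (by simp [h])]; simp [h]
      · rw [altLoop, if_pos h]
        simp only [Bool.not_true, Bool.false_eq_true, if_false, Bool.true_and]
        by_cases hlo : lo < s <;> simp [hlo]
    rw [hstep, ih, List.reverse_cons, List.find?_append]
    cases hr : rest.reverse.find? (fun s => matchAt what _in s && decide (lo < s))
    · simp only [Option.none_or]
      cases h : (matchAt what _in s && decide (lo < s)) <;>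
        simp [h]
    · simp

-- a slice strictly shorter than `what` is never equal to it
theorem slice_ne_short (what _in : List Int) (i : Int) (h0 : 0 ≤ i)
    (hm : 1 ≤ (what.length : Int)) (hgt : (_in.length : Int) - (what.length : Int) < i) :
    PySem.List.slice _in (some i) (some (i + (what.length : Int))) ≠ what := by
  intro heq
  have h1 : 0 ≤ i + (what.length : Int) := by omega
  rw [PySem.List.slice_toNat _ h0 h1] at heq
  have hlen := congrArg List.length heq
  simp [List.length_take, List.length_drop] at hlen
  omega

theorem condA_iff (what _in : List Int) (i : Int) (hw : what ≠ [])
    (h0 : 0 ≤ i) (hn : i < (_in.length : Int)) :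
    condA what _in i =
      decide (PySem.List.slice _in (some i) (some (i + (what.length : Int))) = what) := by
  have hm : 0 < what.length := List.length_pos_iff.mpr hw
  cases hd : decide (PySem.List.slice _in (some i) (some (i + (what.length : Int))) = what)
  · have hne := of_decide_eq_false hd
    simp [condA]
    intro _; exact fun h => hne h
  · have heq := of_decide_eq_true hd
    have h1 : 0 ≤ i + (what.length : Int) := by omega
    rw [PySem.List.slice_toNat _ h0 h1] at heq
    have hi' : i.toNat < _in.length := by omega
    have hk : (i + (what.length : Int)).toNat - i.toNat = what.length := by omega
    rw [hk] at heq
    have hq : what[0]? = _in[i.toNat]? := by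
      conv_lhs => rw [← heq]
      simp [List.getElem?_take, List.getElem?_drop, hm]
    have hfirst : what[0] = _in[i.toNat] := by
      have h1' : what[0]? = some what[0] := List.getElem?_eq_getElem hm
      have h2' : _in[i.toNat]? = some _in[i.toNat] := List.getElem?_eq_getElem hi'
      rw [h1', h2'] at hq; exact Option.some.inj hq
    have hg1 : PySem.List.pyGet? _in i = some _in[i.toNat] :=
      PySem.List.pyGet?_eq_some_getElem _ h0 (by exact_mod_cast hn)
    have hg2 : PySem.List.pyGet? what 0 = some what[0] := by
      have := PySem.List.pyGet?_eq_some_getElem what (le_refl 0) (by exact_mod_cast hm)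
      simpa using this
    simp [condA, hg1, hg2, hfirst, of_decide_eq_true hd]

theorem matchAt_iff (what _in : List Int) (s : Int) (h0 : 0 ≤ s)
    (hsm : s + (what.length : Int) ≤ (_in.length : Int)) :
    matchAt what _in s =
      decide (PySem.List.slice _in (some s) (some (s + (what.length : Int))) = what) := by
  have hk : (s + (what.length : Int)).toNat - s.toNat = what.length := by omega
  have hslice : PySem.List.slice _in (some s) (some (s + (what.length : Int)))
      = List.take what.length (List.drop s.toNat _in) := by
    rw [PySem.List.slice_toNat _ h0 (by omega), hk]
  have hlen : (List.take what.length (List.drop s.toNat _in)).length = what.length := by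
    simp [List.length_take, List.length_drop]; omega
  have lhs_iff : matchAt what _in s = true ↔
      ∀ j : Int, 0 ≤ j → j < (what.length : Int) →
        PySem.List.pyGet? _in (s + j) = some (PySem.List.pyGetD what j 0) := by
    rw [matchAt, PySem.List.enumerate_eq_map_pyRange what 0]
    simp only [List.all_map, List.all_eq_true, Function.comp, beq_iff_eq, PySem.List.len_eq]
    constructor
    · intro H j hj0 hjm
      exact H j (by rw [PySem.List.mem_pyRange_one]; exact ⟨hj0, hjm⟩)
    · intro H j hj
      rw [PySem.List.mem_pyRange_one] at hj
      exact H j hj.1 hj.2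
  rw [hslice]
  cases hd : decide (List.take what.length (List.drop s.toNat _in) = what)
  · have hne := of_decide_eq_false hd
    by_contra hMA
    have hM : matchAt what _in s = true := by
      revert hMA; cases matchAt what _in s <;> simp
    have H := lhs_iff.mp hM
    apply hne
    apply List.ext_getElem (by rw [hlen])
    intro jn hj1 hj2
    have hjm : ((jn : Int)) < (what.length : Int) := by
      rw [hlen] at hj1; exact_mod_cast hj1
    have hh := H (jn : Int) (Int.natCast_nonneg jn) hjm
    rw [PySem.List.pyGet?_of_nonneg _ (by omega), PySem.List.pyGetD_natCast,
        show ((s + (jn : Int)).toNat) = s.toNat + jn from by omega] at hh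
    have hb : s.toNat + jn < _in.length := by omega
    rw [List.getElem?_eq_getElem hb, List.getD_eq_getElem _ _ hj2] at hh
    rw [List.getElem_take, List.getElem_drop]
    exact Option.some.inj hh
  · have heq := of_decide_eq_true hd
    rw [lhs_iff]
    intro j hj0 hjm
    rw [PySem.List.pyGet?_of_nonneg _ (by omega),
        PySem.List.pyGetD_eq_getElem _ 0 hj0 hjm,
        show ((s + j).toNat) = s.toNat + j.toNat from by omega]
    have hb : s.toNat + j.toNat < _in.length := by omega
    rw [List.getElem?_eq_getElem hb]
    have hjw : j.toNat < what.length := by omega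
    have h2 := List.getElem_of_eq heq.symm (i := j.toNat) hjw
    rw [List.getElem_take, List.getElem_drop] at h2
    exact congrArg some h2.symm

-- ===== VERDICT (by name: the statement is the Claim_ definition above) =====
theorem where_is_spec : Claim_equal_where_is := by
  intro what _in rev _dom hpre
  unfold Spec_where_is
  have hfd : PySem.Int.floordiv ((_in.length : Nat) : Int) 2 = ((_in.length : Nat) : Int) / 2 :=
    PySem.Int.floordiv_eq_ediv_of_pos (by norm_num)
  by_cases hw : what = []
  · subst hw
    have hlen : _in.length < 2 := by
      rcases hpre with h | h
      · exact absurd rfl h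
      · exact h
    have hl0 : ((_in.length : Nat) : Int) / 2 = 0 := by omega
    cases rev
    · simp only [where_is, where_is_alt, List.length_nil, Nat.cast_zero, Bool.not_false,
        if_true, hfd, hl0]
      rw [show min ((_in.length : Nat) : Int) 0 = 0 from by omega,
        PySem.List.pyRange_one_eq_nil le_rfl]
      simp [whereLoopA]
    · simp only [where_is, where_is_alt, List.length_nil, Nat.cast_zero, Bool.not_true,
        Bool.false_eq_true, if_false, hfd, hl0, sub_zero]
      rw [show max 0 ((_in.length : Nat) : Int) = ((_in.length : Nat) : Int) from by omega,
        PySem.List.pyRange_neg_one_eq_nil le_rfl]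
      simp [whereLoopA]
  · have hm0 : 0 < what.length := List.length_pos_iff.mpr hw
    have hm1 : (1 : Int) ≤ ((what.length : Nat) : Int) := by exact_mod_cast hm0
    cases rev
    · -- forward
      simp only [where_is, where_is_alt, Bool.not_false, if_true, hfd, whereLoopA_eq]
      by_cases hmn : ((what.length : Nat) : Int) > ((_in.length : Nat) : Int)
      · rw [if_pos (Or.inr hmn)]
        rw [List.find?_eq_none.mpr ?_]
        · rfl
        · intro x hx
          rw [PySem.List.mem_pyRange_one] at hx
          simp only [condA, Bool.and_eq_true, beq_iff_eq, not_and]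
          intro _ hsl
          exact slice_ne_short what _in x (by omega) hm1 (by omega) hsl
      · rw [if_neg (by omega), altLoop_false]
        set nn : Int := ((_in.length : Nat) : Int) with hnn
        set mm : Int := ((what.length : Nat) : Int) with hmm
        rw [show min nn (nn / 2) = nn / 2 from by omega]
        set c : Int := min (nn / 2) (nn - mm + 1) with hc
        rw [PySem.List.pyRange_one_append 0 c (nn / 2) (by omega) (by omega),
            PySem.List.pyRange_one_append 0 c (nn - mm + 1) (by omega) (by omega),
            List.find?_append, List.find?_append]
        have hcongr : (PySem.List.pyRange 0 c).find? (condA what _in)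
            = (PySem.List.pyRange 0 c).find? (matchAt what _in) := by
          apply find?_congr_mem
          intro x hx
          rw [PySem.List.mem_pyRange_one] at hx
          rw [condA_iff what _in x hw (by omega) (by omega),
              matchAt_iff what _in x (by omega) (by omega)]
        rw [hcongr]
        cases hf : (PySem.List.pyRange 0 c).find? (matchAt what _in) with
        | some s =>
          have hs := List.mem_of_find?_eq_some hf
          rw [PySem.List.mem_pyRange_one] at hs
          simp only [Option.some_or, Option.map_some, Option.getD_some]
          rw [if_pos (by omega)]
        | none =>
          simp only [Option.none_or]
          have hA : (PySem.List.pyRange c (nn / 2)).find? (condA what _in) = none := by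
            rw [List.find?_eq_none]
            intro x hx
            rw [PySem.List.mem_pyRange_one] at hx
            simp only [condA, Bool.and_eq_true, beq_iff_eq, not_and]
            intro _ hsl
            exact slice_ne_short what _in x (by omega) hm1 (by omega) hsl
          rw [hA]
          cases hg : (PySem.List.pyRange c (nn - mm + 1)).find? (matchAt what _in) with
          | none => simp
          | some s =>
            have hs := List.mem_of_find?_eq_some hg
            rw [PySem.List.mem_pyRange_one] at hs
            simp only [Option.map_some, Option.getD_some, Option.getD_none]
            rw [if_neg (by omega)]
    · -- reverse
      simp only [where_is, where_is_alt, Bool.not_true, Bool.false_eq_true, if_false, hfd,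
        whereLoopA_eq]
      by_cases hmn : ((what.length : Nat) : Int) > ((_in.length : Nat) : Int)
      · rw [if_pos (Or.inr hmn)]
        rw [PySem.List.pyRange_neg_one_eq_nil (by omega)]
        rfl
      · rw [if_neg (by omega), altLoop_true]
        set nn : Int := ((_in.length : Nat) : Int) with hnn
        set mm : Int := ((what.length : Nat) : Int) with hmm
        set g : Int := max 0 (nn - nn / 2) with hg0
        rw [PySem.List.pyRange_neg_one_eq_reverse]
        by_cases hgm : g ≤ nn - mm
        · rw [PySem.List.pyRange_one_append 0 (g + 1) (nn - mm + 1) (by omega) (by omega),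
              List.reverse_append, List.find?_append]
          have h1 : ((PySem.List.pyRange 0 (g + 1)).reverse.find?
              (fun s => matchAt what _in s && decide (g < s))) = none := by
            rw [List.find?_eq_none]
            intro x hx
            rw [List.mem_reverse, PySem.List.mem_pyRange_one] at hx
            simp only [Bool.and_eq_true, decide_eq_true_eq, not_and]
            intro _
            omega
          have h2 : ((PySem.List.pyRange (g + 1) (nn - mm + 1)).reverse.find?
              (fun s => matchAt what _in s && decide (g < s)))
              = ((PySem.List.pyRange (g + 1) (nn - mm + 1)).reverse.find? (condA what _in)) := by
            apply find?_congr_mem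
            intro x hx
            rw [List.mem_reverse, PySem.List.mem_pyRange_one] at hx
            rw [matchAt_iff what _in x (by omega) (by omega),
                condA_iff what _in x hw (by omega) (by omega)]
            simp [show g < x from by omega]
          rw [h1, h2]
          cases hf : (PySem.List.pyRange (g + 1) (nn - mm + 1)).reverse.find? (condA what _in) <;>
            simp
        · rw [PySem.List.pyRange_one_eq_nil (show nn - mm + 1 ≤ g + 1 from by omega)]
          have hB : ((PySem.List.pyRange 0 (nn - mm + 1)).reverse.find?
              (fun s => matchAt what _in s && decide (g < s))) = none := by
            rw [List.find?_eq_none]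
            intro x hx
            rw [List.mem_reverse, PySem.List.mem_pyRange_one] at hx
            simp only [Bool.and_eq_true, decide_eq_true_eq, not_and]
            intro _
            omega
          rw [hB]
          simp
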